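-- pv_equiv track=rewrite | github.com/isaomisk/HoroloGen | models.py | _convert_qmark_to_format
-- ===== SOURCE A (Python) =====
-- def _convert_qmark_to_format(sql: str, n_params: int) -> str:
--     if n_params <= 0:
--         return sql
--     out = []
--     replaced = 0
--     for ch in sql:
--         if ch == "?" and replaced < n_params:
--             out.append("%s")
--             replaced += 1
--         else:
--             out.append(ch)
--     if replaced != n_params:
--         raise ValueError(f"placeholder mismatch: expected {n_params} '?', replaced {replaced}")
--     return "".join(out)
-- ===== SOURCE B (Python) =====
-- def _convert_qmark_to_format(sql: str, n_params: int) -> str: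
--     if n_params <= 0:
--         return sql
--     count = sql.count("?")
--     if count < n_params:
--         raise ValueError(f"placeholder mismatch: expected {n_params} '?', replaced {count}")
--     return sql.replace("?", "%s", n_params)
-- ===== Notes on version B (the rewrite author's own statement) =====
-- stated objective: simpler
-- what changed: Replaced the manual char-by-char accumulator loop with bounded counter by a one-pass count('?') guard followed by the built-in bounded str.replace('?','%s',n_params).
import Mathlib
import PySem

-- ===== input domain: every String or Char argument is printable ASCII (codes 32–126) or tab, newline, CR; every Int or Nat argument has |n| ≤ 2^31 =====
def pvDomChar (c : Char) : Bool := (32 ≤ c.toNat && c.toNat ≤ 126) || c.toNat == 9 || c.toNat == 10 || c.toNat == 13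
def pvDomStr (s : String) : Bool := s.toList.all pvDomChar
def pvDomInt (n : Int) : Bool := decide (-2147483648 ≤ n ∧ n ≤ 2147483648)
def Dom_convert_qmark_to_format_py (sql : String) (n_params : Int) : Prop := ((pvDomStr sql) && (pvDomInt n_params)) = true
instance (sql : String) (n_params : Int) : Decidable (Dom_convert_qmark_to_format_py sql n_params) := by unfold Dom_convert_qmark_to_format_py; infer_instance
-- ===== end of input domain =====

-- B replaces A's char-by-char accumulator loop by count('?') plus a bounded replace (simpler).

-- ===== PORT A =====
-- literal port of A's loop: out list and replaced counter; the ValueError branch is excluded by Pre_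
def convert_qmark_to_format_py (sql : String) (n_params : Int) : String :=
  if n_params ≤ 0 then sql
  else
    let st := sql.toList.foldl
      (fun (st : List Char × Int) ch =>
        if ch = '?' ∧ st.2 < n_params then (st.1 ++ ['%', 's'], st.2 + 1)
        else (st.1 ++ [ch], st.2))
      ([], 0)
    -- if st.2 ≠ n_params Python raises ValueError (outside Pre_); the join is returned regardless
    String.mk st.1

-- ===== PORT B =====
-- Python's str.replace(old, new, count) hand-ported for the single-char old '?' (exact there)
def pvReplN : List Char → Int → List Char
  | [], _ => []
  | c :: cs, n => if 0 < n ∧ c = '?' then '%' :: 's' :: pvReplN cs (n - 1) else c :: pvReplN cs n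

def convert_qmark_to_format_py_alt (sql : String) (n_params : Int) : String :=
  if n_params ≤ 0 then sql
  else
    let count := PySem.Str.count sql "?"
    -- if count < n_params Python raises ValueError (outside Pre_); the replace is returned regardless
    let _ := count  -- count only feeds the ValueError branch, which Pre_ excludes
    String.mk (pvReplN sql.toList n_params)

-- ===== PRECONDITION & SPEC =====
-- Pre_ excludes exactly the inputs on which A raises ValueError: 0 < n_params but fewer than n_params '?' in sql
def Pre_convert_qmark_to_format_py (sql : String) (n_params : Int) : Prop :=
  n_params ≤ 0 ∨ n_params ≤ (PySem.Str.count sql "?" : Int)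
instance (sql : String) (n_params : Int) : Decidable (Pre_convert_qmark_to_format_py sql n_params) := by unfold Pre_convert_qmark_to_format_py; infer_instance
def pvWitness_convert_qmark_to_format_py : String × Int := ("select * from t where a = ? and b = ?", 2)
def Spec_convert_qmark_to_format_py (sql : String) (n_params : Int) (out : String) : Prop := out = convert_qmark_to_format_py_alt sql n_params
instance (sql : String) (n_params : Int) (out : String) : Decidable (Spec_convert_qmark_to_format_py sql n_params out) := by unfold Spec_convert_qmark_to_format_py; infer_instance

-- ===== CLAIM (what is proved, stated in full; the proofs are below) =====
def Claim_equal_convert_qmark_to_format_py : Prop := ∀ (sql : String) (n_params : Int), Dom_convert_qmark_to_format_py sql n_params → Pre_convert_qmark_to_format_py sql n_params → Spec_convert_qmark_to_format_py sql n_params (convert_qmark_to_format_py sql n_params)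

-- ===== LEMMAS AND PROOFS =====
lemma foldA_eq_replN (n : Int) (cs : List Char) :
    ∀ (acc : List Char) (r : Int),
      (cs.foldl
        (fun (st : List Char × Int) ch =>
          if ch = '?' ∧ st.2 < n then (st.1 ++ ['%', 's'], st.2 + 1)
          else (st.1 ++ [ch], st.2))
        (acc, r)).1 = acc ++ pvReplN cs (n - r) := by
  induction cs with
  | nil => intro acc r; simp [pvReplN]
  | cons c cs ih =>
    intro acc r
    by_cases h : c = '?' ∧ r < n
    · have h2 : 0 < n - r := by omega
      have h3 : n - (r + 1) = n - r - 1 := by omega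
      simp [List.foldl, h, ih, pvReplN, h3]
    · have h2 : ¬ (0 < n - r ∧ c = '?') := by
        rintro ⟨h1, hc⟩; exact h ⟨hc, by omega⟩
      simp only [List.foldl, if_neg h, ih, pvReplN, if_neg h2, List.append_assoc,
        List.singleton_append]

theorem pv_spec_aux (sql : String) (n_params : Int) :
    convert_qmark_to_format_py sql n_params = convert_qmark_to_format_py_alt sql n_params := by
  unfold convert_qmark_to_format_py convert_qmark_to_format_py_alt
  by_cases h : n_params ≤ 0
  · simp [h]
  · simp [h, foldA_eq_replN n_params sql.toList [] 0]

-- ===== VERDICT (by name: the statement is the Claim_ definition above) =====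
theorem convert_qmark_to_format_py_spec : Claim_equal_convert_qmark_to_format_py := by
  intro sql n_params _ _
  exact pv_spec_aux sql n_params
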